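-- pv_equiv track=rewrite | github.com/soothill/LLDPNetworkDiscovery | lldp_discovery.py | _clean_port_names
-- ===== SOURCE A (Python) =====
-- from typing import Dict, List, Tuple, Optional
--
-- def _clean_port_names(ports: List[str]) -> Dict[str, List[str]]:
--     """
--     Clean port names by removing suffixes like ",bridge", ",trunk", etc.
--     Returns mapping of clean_name -> [list of original_names]
--
--     Multiple ports may have the same clean name (e.g., "eth0,bridge" and "eth0,vlan100")
--     so we need to map one clean name to multiple original names.
--     """
--     port_mapping = {}
--     for port in ports:
--         # Extract just the interface name before any comma
--         clean_port = port.split(',')[0]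
--         if clean_port not in port_mapping:
--             port_mapping[clean_port] = []
--         port_mapping[clean_port].append(port)
--     return port_mapping
-- ===== SOURCE B (Python) =====
-- def _clean_port_names(ports):
--     # Two-pass grouping: ordered distinct keys first, then one comprehension per key.
--     keys = list(dict.fromkeys(p.split(',')[0] for p in ports))
--     return {k: [p for p in ports if p.split(',')[0] == k] for k in keys}
-- ===== Notes on version B (the rewrite author's own statement) =====
-- stated objective: alternative
-- what changed: Replaces the single-pass dict-accumulation (conditional empty-list insert then append) by a two-pass scheme: an ordered dedup of the comma-prefix keys followed by a per-key filtering comprehension over the ports.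
import Mathlib
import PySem

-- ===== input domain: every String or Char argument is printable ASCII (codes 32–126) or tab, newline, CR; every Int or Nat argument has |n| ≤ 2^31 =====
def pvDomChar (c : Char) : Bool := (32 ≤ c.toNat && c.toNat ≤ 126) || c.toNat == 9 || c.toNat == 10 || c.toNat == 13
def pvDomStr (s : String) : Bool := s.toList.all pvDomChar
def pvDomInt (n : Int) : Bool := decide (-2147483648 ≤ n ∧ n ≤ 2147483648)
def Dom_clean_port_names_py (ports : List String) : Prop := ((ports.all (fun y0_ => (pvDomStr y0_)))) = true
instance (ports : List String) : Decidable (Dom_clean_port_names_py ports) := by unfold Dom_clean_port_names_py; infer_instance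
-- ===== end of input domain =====

-- B replaces A's one-pass conditional-insert-then-append dict accumulation by an ordered
-- dedup of the comma-prefix keys followed by a per-key filter over the ports (alternative
-- decomposition, same results).

-- ===== PORT A =====
def clean_port_names_py (ports : List String) : List (String × List String) :=
  (ports.foldl (fun port_mapping port =>
      -- clean_port = port.split(',')[0]  (split(',') is never empty, so index 0 is total)
      let clean_port := PySem.List.pyGetD (((PySem.Str.split? port ",").getD [])) 0 ""
      let port_mapping :=
        if port_mapping.contains clean_port then port_mapping
        else port_mapping.insert clean_port ([] : List String)
      port_mapping.modify clean_port [] (fun l => l ++ [port]))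
    PySem.Dict.empty).items

-- ===== PORT B =====
def clean_port_names_py_alt (ports : List String) : List (String × List String) :=
  let keys := PySem.List.dedup
      (ports.map (fun p => PySem.List.pyGetD (((PySem.Str.split? p ",").getD [])) 0 ""))
  keys.map (fun k =>
    (k, ports.filter (fun p => PySem.List.pyGetD (((PySem.Str.split? p ",").getD [])) 0 "" == k)))

-- ===== PRECONDITION & SPEC =====
def Spec_clean_port_names_py (ports : List String) (out : List (String × List String)) : Prop := out = clean_port_names_py_alt ports
instance (ports : List String) (out : List (String × List String)) : Decidable (Spec_clean_port_names_py ports out) := by unfold Spec_clean_port_names_py; infer_instance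

-- ===== CLAIM (what is proved, stated in full; the proofs are below) =====
def Claim_equal_clean_port_names_py : Prop := ∀ (ports : List String), Dom_clean_port_names_py ports → Spec_clean_port_names_py ports (clean_port_names_py ports)

-- ===== LEMMAS AND PROOFS =====

-- A's loop body (conditionally seed an empty list, then append) is exactly Dict.modify.
theorem pv_step_eq (d : PySem.Dict String (List String)) (k s : String) :
    (if d.contains k then d else d.insert k ([] : List String)).modify k []
        (fun l => l ++ [s])
      = d.modify k [] (fun l => l ++ [s]) := by
  by_cases h : d.contains k = true
  · simp [h]
  · have h' : d.contains k = false := by simpa using h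
    simp only [h', Bool.false_eq_true, if_false, PySem.Dict.modify,
      PySem.Dict.insert_insert_self, PySem.Dict.getD_insert_self,
      PySem.Dict.getD_of_not_contains d ([] : List String) h']

theorem clean_port_names_py_spec : Claim_equal_clean_port_names_py := by
  intro ports _
  unfold Spec_clean_port_names_py clean_port_names_py clean_port_names_py_alt
  simp only [pv_step_eq]
  set key : String → String :=
    fun p => PySem.List.pyGetD ((PySem.Str.split? p ",").getD []) 0 "" with hkey
  set d : PySem.Dict String (List String) :=
    ports.foldl (fun d p => d.modify (key p) [] (fun l => l ++ [p])) PySem.Dict.empty with hd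
  have hnd : d.keys.Nodup := by
    rw [hd]
    exact PySem.Dict.nodup_keys_foldl_modify_key ports key []
      (fun _ p l => l ++ [p]) PySem.Dict.empty PySem.Dict.nodup_keys_empty
  have hkeys : d.keys = PySem.List.dedup (ports.map key) := by
    rw [hd, PySem.Dict.keys_foldl_modify_key ports key [] (fun _ p l => l ++ [p]),
      PySem.Dict.keys_empty, PySem.Set.update_nil_left, PySem.List.dedup_eq_ofList]
  have hgetD : ∀ c, d.getD c [] = ports.filter (fun p => key p == c) := by
    intro c
    have hfm : (ports.map (fun p => (key p, p))).foldl
        (fun d (q : String × String) => d.modify q.1 [] (fun l => l ++ [q.2]))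
        PySem.Dict.empty = d := by
      rw [hd, List.foldl_map]
    have h2 := PySem.Dict.getD_foldl_modify_append
      (ports.map (fun p => (key p, p))) PySem.Dict.empty c
    rw [hfm] at h2
    rw [h2, PySem.Dict.getD_empty, List.nil_append, List.filter_map]
    simp [Function.comp_def]
  rw [PySem.Dict.items_eq_map_keys d hnd [], hkeys]
  exact List.map_congr_left (fun k _ => by rw [hgetD k])
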